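-- pv_equiv track=rewrite | github.com/s-zaizen/makina | ml/scripts/converters/cvefixes_pairs.py | _cluster_lines
-- ===== SOURCE A (Python) =====
-- def _cluster_lines(entries: list, gap: int = 3) -> list[tuple[int, int]]:
--     if not entries:
--         return []
--     nums = sorted({int(e[0]) for e in entries if isinstance(e, (list, tuple)) and e})
--     spans: list[tuple[int, int]] = []
--     if not nums:
--         return spans
--     start = prev = nums[0]
--     for n in nums[1:]:
--         if n - prev > gap:
--             spans.append((start, prev))
--             start = n
--         prev = n
--     spans.append((start, prev))
--     return spans
-- ===== SOURCE B (Python) =====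
-- def _cluster_lines(entries: list, gap: int = 3) -> list[tuple[int, int]]:
--     if not entries:
--         return []
--     nums = sorted({int(e[0]) for e in entries if isinstance(e, (list, tuple)) and e})
--
--     def spans(xs):
--         # recursively peel off the leading chained run as one span
--         if not xs:
--             return []
--         i = 1
--         while i < len(xs) and xs[i] - xs[i - 1] <= gap:
--             i += 1
--         return [(xs[0], xs[i - 1])] + spans(xs[i:])
--
--     return spans(nums)
-- ===== Notes on version B (the rewrite author's own statement) =====
-- stated objective: alternative
-- what changed: Replaces the stateful accumulate-and-append loop (start/prev registers plus trailing append) with a recursive decomposition that peels off the leading gap-chained run as one span and recurses on the remainder.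
import Mathlib
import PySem

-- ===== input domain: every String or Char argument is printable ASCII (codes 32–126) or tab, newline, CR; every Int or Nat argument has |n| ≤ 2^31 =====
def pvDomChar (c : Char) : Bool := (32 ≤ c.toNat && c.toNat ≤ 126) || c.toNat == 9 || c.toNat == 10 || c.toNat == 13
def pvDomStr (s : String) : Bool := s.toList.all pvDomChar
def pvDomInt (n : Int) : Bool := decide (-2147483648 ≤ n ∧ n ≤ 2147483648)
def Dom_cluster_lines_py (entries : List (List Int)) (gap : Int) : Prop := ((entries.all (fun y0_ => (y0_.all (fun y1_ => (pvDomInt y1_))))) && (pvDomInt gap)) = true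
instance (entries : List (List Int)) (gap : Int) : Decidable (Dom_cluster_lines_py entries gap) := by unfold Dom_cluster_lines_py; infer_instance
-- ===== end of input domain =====

-- B changes the decomposition only (recursive run-peeling instead of a stateful loop); same cost.

-- ===== PORT A =====
-- one loop step: state (spans, start, prev), next number n
def stepA (gap : Int) (st : List (Int × Int) × Int × Int) (n : Int) : List (Int × Int) × Int × Int :=
  if n - st.2.2 > gap then (st.1 ++ [(st.2.1, st.2.2)], n, n) else (st.1, st.2.1, n)

def cluster_lines_py (entries : List (List Int)) (gap : Int) : List (Int × Int) :=
  if entries = [] then []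
  else
    let nums := PySem.List.sorted (PySem.Set.ofList (entries.filterMap List.head?)) (fun x => x) false
    match nums with
    | [] => []
    | h :: t =>
      let st := t.foldl (stepA gap) ([], h, h)
      st.1 ++ [(st.2.1, st.2.2)]

-- ===== PORT B =====
-- the while loop of B: walk the chained run from prev; return (last of run, remainder)
def chopB (gap : Int) : Int → List Int → Int × List Int
  | prev, [] => (prev, [])
  | prev, n :: rest => if n - prev ≤ gap then chopB gap n rest else (prev, n :: rest)

theorem chopB_len (gap : Int) : ∀ prev t, (chopB gap prev t).2.length ≤ t.length := by
  intro prev t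
  induction t generalizing prev with
  | nil => simp [chopB]
  | cons n rest ih =>
    simp only [chopB]
    split
    · exact le_trans (ih n) (Nat.le_succ _)
    · simp

def spansB (gap : Int) : List Int → List (Int × Int)
  | [] => []
  | start :: rest =>
    let c := chopB gap start rest
    (start, c.1) :: spansB gap c.2
termination_by xs => xs.length
decreasing_by
  simpa using Nat.lt_succ_of_le (chopB_len gap start rest)

def cluster_lines_py_alt (entries : List (List Int)) (gap : Int) : List (Int × Int) :=
  if entries = [] then []
  else
    spansB gap (PySem.List.sorted (PySem.Set.ofList (entries.filterMap List.head?)) (fun x => x) false)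

-- ===== PRECONDITION & SPEC =====
def Spec_cluster_lines_py (entries : List (List Int)) (gap : Int) (out : List (Int × Int)) : Prop := out = cluster_lines_py_alt entries gap
instance (entries : List (List Int)) (gap : Int) (out : List (Int × Int)) : Decidable (Spec_cluster_lines_py entries gap out) := by unfold Spec_cluster_lines_py; infer_instance

-- ===== CLAIM (what is proved, stated in full; the proofs are below) =====
def Claim_equal_cluster_lines_py : Prop := ∀ (entries : List (List Int)) (gap : Int), Dom_cluster_lines_py entries gap → Spec_cluster_lines_py entries gap (cluster_lines_py entries gap)

-- ===== LEMMAS AND PROOFS =====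
theorem loopA_eq_spansB (gap : Int) :
    ∀ (t : List Int) (acc : List (Int × Int)) (start prev : Int),
      (let st := t.foldl (stepA gap) (acc, start, prev); st.1 ++ [(st.2.1, st.2.2)])
        = acc ++ (start, (chopB gap prev t).1) :: spansB gap (chopB gap prev t).2 := by
  intro t
  induction t with
  | nil => intro acc start prev; simp [chopB, spansB]
  | cons n rest ih =>
    intro acc start prev
    simp only [List.foldl_cons, stepA, chopB]
    by_cases h : n - prev > gap
    · rw [if_pos h, if_neg (by omega)]
      simpa [spansB] using ih (acc ++ [(start, prev)]) n n
    · rw [if_neg h, if_pos (by omega)]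
      exact ih acc start n

-- ===== VERDICT (by name: the statement is the Claim_ definition above) =====
theorem cluster_lines_py_spec : Claim_equal_cluster_lines_py := by
  intro entries gap _
  unfold Spec_cluster_lines_py cluster_lines_py cluster_lines_py_alt
  split
  · rfl
  · cases h : PySem.List.sorted (PySem.Set.ofList (entries.filterMap List.head?)) (fun x => x) false with
    | nil => simp [spansB]
    | cons m t =>
      simpa [spansB] using loopA_eq_spansB gap t [] m m
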